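-- pv_equiv track=rewrite | github.com/DragunWF/Competitive-Programming | CodeWars/python/6_kyu/repeat_adjacent.py | repeat_adjacent
-- ===== SOURCE A (Python) =====
-- def repeat_adjacent(st):
--     big_groups, groups, temp = 0, [], ""
--     for i, char in enumerate(st):
--         if not temp or st[i - 1] == char:
--             temp += char
--         else:
--             groups.append(temp)
--             temp = char
--     groups.append(temp)
--
--     adjacent_groups, lock = 0, False
--     for group in groups:
--         if len(group) >= 2:
--             adjacent_groups += 1
--         else:
--             adjacent_groups = 0
--             lock = False
--         if adjacent_groups >= 2 and not lock:
--             big_groups += 1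
--             lock = True
--     return big_groups
-- ===== SOURCE B (Python) =====
-- def _group(xs):
--     # maximal runs of equal elements, as (value, run length) pairs: scan each span once
--     res = []
--     i, n = 0, len(xs)
--     while i < n:
--         j = i + 1
--         while j < n and xs[j] == xs[i]:
--             j += 1
--         res.append((xs[i], j - i))
--         i = j
--     return res
--
-- def repeat_adjacent(st):
--     flags = [n >= 2 for _, n in _group(st)]
--     return sum(1 for f, n in _group(flags) if f and n >= 2)
-- ===== Notes on version B (the rewrite author's own statement) =====
-- stated objective: simpler
-- what changed: A builds the character groups with an enumerate loop doing st[i-1] lookups and then counts via an adjacent_groups counter plus a lock flag; B groups the string into run lengths by a small span-recursion helper, maps them to big-run flags, groups those flags with the same helper and counts the true-groups of length >= 2.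
import Mathlib
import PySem

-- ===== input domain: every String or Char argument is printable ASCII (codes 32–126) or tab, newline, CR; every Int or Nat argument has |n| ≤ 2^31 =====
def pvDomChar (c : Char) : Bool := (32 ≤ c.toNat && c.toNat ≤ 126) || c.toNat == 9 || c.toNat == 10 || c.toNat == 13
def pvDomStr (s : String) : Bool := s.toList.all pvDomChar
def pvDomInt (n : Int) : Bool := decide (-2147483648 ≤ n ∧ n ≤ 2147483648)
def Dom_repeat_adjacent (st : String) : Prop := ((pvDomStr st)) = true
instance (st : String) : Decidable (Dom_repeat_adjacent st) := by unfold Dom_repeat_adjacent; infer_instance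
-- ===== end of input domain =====

-- B replaces A's index-lookup grouping loop and lock/adjacent_groups state machine by a
-- group-then-group-the-flags decomposition (span recursion into run lengths, applied twice); objective: simpler.

-- ===== PORT A =====
def repeat_adjacent (st : String) : Int :=
  let cs := st.toList
  let r := (PySem.List.enumerate cs).foldl
    (fun (s : List (List Char) × List Char) (p : Int × Char) =>
      if s.2 = [] ∨ PySem.List.pyGet? cs (p.1 - 1) = some p.2 then
        (s.1, s.2 ++ [p.2])
      else
        (s.1 ++ [s.2], [p.2])) ([], [])
  let groups := r.1 ++ [r.2]
  let r2 := groups.foldl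
    (fun (s : Int × Int × Bool) (g : List Char) =>
      let s1 := if (g.length : Int) ≥ 2 then (s.1, s.2.1 + 1, s.2.2) else (s.1, (0 : Int), false)
      if s1.2.1 ≥ 2 ∧ s1.2.2 = false then (s1.1 + 1, s1.2.1, true) else s1)
    (0, 0, false)
  r2.1

-- ===== PORT B =====
-- maximal runs of equal elements as (value, run length) pairs, by recursion on the suffix
def pvGroup {α : Type} [DecidableEq α] : List α → List (α × Int)
  | [] => []
  | x :: xs =>
    let k := (xs.takeWhile (fun y => y = x)).length
    (x, (k : Int) + 1) :: pvGroup (xs.drop k)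
termination_by xs => xs.length
decreasing_by simp

def repeat_adjacent_alt (st : String) : Int :=
  let flags := (pvGroup st.toList).map (fun p => decide (p.2 ≥ 2))
  (((pvGroup flags).filter (fun p => p.1 && decide (p.2 ≥ 2))).length : Int)

-- ===== PRECONDITION & SPEC =====
def Spec_repeat_adjacent (st : String) (out : Int) : Prop := out = repeat_adjacent_alt st
instance (st : String) (out : Int) : Decidable (Spec_repeat_adjacent st out) := by unfold Spec_repeat_adjacent; infer_instance

-- ===== CLAIM (what is proved, stated in full; the proofs are below) =====
def Claim_equal_repeat_adjacent : Prop := ∀ (st : String), Dom_repeat_adjacent st → Spec_repeat_adjacent st (repeat_adjacent st)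

-- ===== LEMMAS AND PROOFS =====

-- A's first loop, with the string lookup st[i-1] replaced by the last character of the current run
def stepG (s : List (List Char) × List Char) (c : Char) : List (List Char) × List Char :=
  if s.2 = [] ∨ s.2.getLast? = some c then (s.1, s.2 ++ [c]) else (s.1 ++ [s.2], [c])

-- A's grouping, rewritten as recursion on the remaining characters
def groupsRec : List Char → List Char → List (List Char)
  | t, [] => [t]
  | t, c :: cs => if t.getLast? = some c then groupsRec (t ++ [c]) cs else t :: groupsRec [c] cs

-- value of A's second loop given the length n of the current trailing run of big groups
def countCont : Nat → List Bool → Int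
  | _, [] => 0
  | n, true :: bs => (if n = 1 then 1 else 0) + countCont (n+1) bs
  | _, false :: bs => countCont 0 bs

-- A's second loop, as a step function on the flag "this group has length ≥ 2"
def mStep (s : Int × Int × Bool) (f : Bool) : Int × Int × Bool :=
  let s1 := if f then (s.1, s.2.1 + 1, s.2.2) else (s.1, (0 : Int), false)
  if s1.2.1 ≥ 2 ∧ s1.2.2 = false then (s1.1 + 1, s1.2.1, true) else s1

theorem dropWhile_eq_drop_len {α : Type} (p : α → Bool) (l : List α) :
    l.dropWhile p = l.drop ((l.takeWhile p).length) := by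
  induction l with
  | nil => rfl
  | cons x xs ih => by_cases h : p x <;> simp [h, ih]

theorem foldA_eq_stepG (st : String) : ∀ (cs pre : List Char) (g : List (List Char)) (t : List Char),
    st.toList = pre ++ cs → (t = [] ↔ pre = []) → t.getLast? = pre.getLast? →
    (PySem.List.enumerate cs (pre.length : Int)).foldl
      (fun (s : List (List Char) × List Char) (p : Int × Char) =>
        if s.2 = [] ∨ PySem.List.pyGet? st.toList (p.1 - 1) = some p.2 then
          (s.1, s.2 ++ [p.2])
        else
          (s.1 ++ [s.2], [p.2])) (g, t)
    = cs.foldl stepG (g, t) := by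
  intro cs
  induction cs with
  | nil => intros; simp [PySem.List.enumerate_nil]
  | cons c cs ih =>
    intro pre g t hst hemp hlast
    rw [PySem.List.enumerate_cons, List.foldl_cons, List.foldl_cons]
    dsimp only
    have hst' : st.toList = (pre ++ [c]) ++ cs := by simpa using hst
    have hnext : ((pre.length : Int) + 1) = (((pre ++ [c]).length : Int)) := by simp
    by_cases h0 : t = []
    · subst h0
      have hp0 : pre = [] := hemp.mp rfl
      subst hp0
      rw [if_pos (Or.inl rfl), show stepG (g, ([] : List Char)) c = (g, ([] : List Char) ++ [c]) from by simp [stepG], hnext]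
      exact ih ([] ++ [c]) g ([] ++ [c]) (by simpa using hst') (by simp) (by simp)
    · -- t ≠ [], hence pre ≠ []
      have hpne : pre ≠ [] := fun hp => h0 (hemp.mpr hp)
      obtain ⟨q, a, hq⟩ : ∃ q a, pre = q ++ [a] := by
        rcases List.eq_nil_or_concat pre with h | h
        · exact absurd h hpne
        · simpa using h
      have hget : PySem.List.pyGet? st.toList ((pre.length : Int) - 1) = some a := by
        rw [hst, hq]
        rw [show (q ++ [a]) ++ (c :: cs) = q ++ (a :: (c :: cs)) from by simp]
        rw [show (((q ++ [a]).length : Int)) - 1 = (q.length : Int) from by simp]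
        exact PySem.List.pyGet?_append_length q (c :: cs) a
      have hlast' : t.getLast? = some a := by rw [hlast, hq]; simp
      by_cases hca : a = c
      · have e1cond : (t = [] ∨ PySem.List.pyGet? st.toList ((pre.length : Int) - 1) = some c) := by
          right; rw [hget, hca]
        have e2cond : (t = [] ∨ t.getLast? = some c) := by right; rw [hlast', hca]
        rw [if_pos e1cond, show stepG (g, t) c = (g, t ++ [c]) from by simp [stepG, e2cond], hnext]
        exact ih (pre ++ [c]) g (t ++ [c]) hst' (by simp) (by rw [hq]; simp)
      · have e1cond : ¬ (t = [] ∨ PySem.List.pyGet? st.toList ((pre.length : Int) - 1) = some c) := by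
          rintro (h | h)
          · exact h0 h
          · rw [hget] at h; exact hca (Option.some.inj h)
        have e2cond : ¬ (t = [] ∨ t.getLast? = some c) := by
          rintro (h | h)
          · exact h0 h
          · rw [hlast'] at h; exact hca (Option.some.inj h)
        rw [if_neg e1cond, show stepG (g, t) c = (g ++ [t], [c]) from by simp [stepG, e2cond], hnext]
        exact ih (pre ++ [c]) (g ++ [t]) [c] hst' (by simp) (by simp)

theorem stepG_groups : ∀ (cs : List Char) (g : List (List Char)) (t : List Char), t ≠ [] →
    (cs.foldl stepG (g, t)).1 ++ [(cs.foldl stepG (g, t)).2] = g ++ groupsRec t cs := by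
  intro cs
  induction cs with
  | nil => intro g t _; simp [groupsRec]
  | cons c cs ih =>
    intro g t ht
    by_cases h : t.getLast? = some c
    · have hs : stepG (g, t) c = (g, t ++ [c]) := by simp [stepG, h]
      rw [List.foldl_cons, hs, ih g (t ++ [c]) (by simp)]
      simp [groupsRec, h]
    · have hs : stepG (g, t) c = (g ++ [t], [c]) := by simp [stepG, h, ht]
      rw [List.foldl_cons, hs, ih (g ++ [t]) [c] (by simp)]
      simp [groupsRec, h]

theorem groupsRec_lengths : ∀ (cs t : List Char) (c : Char), t ≠ [] → t.getLast? = some c →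
    (groupsRec t cs).map (fun g => (g.length : Int))
      = ((t.length : Int) + ((cs.takeWhile (fun y => y = c)).length : Int))
          :: (pvGroup (cs.dropWhile (fun y => y = c))).map (·.2) := by
  intro cs
  induction cs with
  | nil => intro t c ht hc; simp [groupsRec, pvGroup]
  | cons d cs ih =>
    intro t c ht hc
    by_cases h : d = c
    · subst h
      rw [groupsRec, if_pos hc]
      rw [ih (t ++ [d]) d (by simp) (by simp)]
      simp
      ring
    · have h2 : ¬ t.getLast? = some d := by rw [hc]; simp; exact fun hcd => h hcd.symm
      rw [groupsRec, if_neg h2]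
      rw [List.map_cons, ih [d] d (by simp) (by simp)]
      have h3 : (List.takeWhile (fun y => decide (y = c)) (d :: cs)) = [] := by
        simp [h]
      have h4 : (List.dropWhile (fun y => decide (y = c)) (d :: cs)) = d :: cs := by
        simp [h]
      rw [h3, h4, pvGroup]
      simp [dropWhile_eq_drop_len]
      ring

theorem countCont_ge2 : ∀ (bs : List Bool) (n m : Nat), 2 ≤ n → 2 ≤ m → countCont n bs = countCont m bs := by
  intro bs
  induction bs with
  | nil => intros; rfl
  | cons b bs ih =>
    intro n m hn hm
    cases b
    · simp [countCont]
    · have hn1 : n ≠ 1 := by omega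
      have hm1 : m ≠ 1 := by omega
      simp [countCont, hn1, hm1]
      exact ih (n+1) (m+1) (by omega) (by omega)

theorem countCont_two (bs : List Bool) : countCont 2 bs = countCont 0 (bs.dropWhile (· = true)) := by
  induction bs with
  | nil => rfl
  | cons b bs ih =>
    cases b
    · simp [countCont, List.dropWhile]
    · simpa [countCont, List.dropWhile, countCont_ge2 bs 3 2 (by omega) (by omega)] using ih

theorem countCont_false (bs : List Bool) : countCont 0 (bs.dropWhile (· = false)) = countCont 0 bs := by
  induction bs with
  | nil => rfl
  | cons b bs ih =>
    cases b
    · simpa [countCont, List.dropWhile] using ih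
    · simp [List.dropWhile]

theorem countCont_one (bs : List Bool) :
    countCont 1 bs = (if 1 ≤ (bs.takeWhile (fun y => y = true)).length then (1:Int) else 0)
      + countCont 0 (bs.drop ((bs.takeWhile (fun y => y = true)).length)) := by
  cases bs with
  | nil => simp [countCont]
  | cons b bs =>
    cases b
    · simp [countCont]
    · simp [countCont, countCont_two, dropWhile_eq_drop_len]

theorem countCont_eq_countB : ∀ (bs : List Bool),
    countCont 0 bs = (((pvGroup bs).filter (fun p => p.1 && decide (p.2 ≥ 2))).length : Int) := by
  intro bs
  induction bs using pvGroup.induct with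
  | case1 => simp [pvGroup, countCont]
  | case2 x xs k ih =>
    cases x
    · -- false head: group filtered out
      rw [pvGroup]
      have h1 : countCont 0 (false :: xs) = countCont 0 xs := rfl
      have h2 : countCont 0 xs = countCont 0 (xs.drop ((xs.takeWhile (fun y => decide (y = false))).length)) := by
        rw [← dropWhile_eq_drop_len]; exact (countCont_false xs).symm
      rw [h1, h2]
      show _ = ((List.filter _ ((false, (k:Int)+1) :: pvGroup (xs.drop k))).length : Int)
      rw [ih]
      simp
    · rw [pvGroup]
      have h1 : countCont 0 (true :: xs) = countCont 1 xs := by simp [countCont]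
      rw [h1, countCont_one]
      show _ = ((List.filter _ ((true, (k:Int)+1) :: pvGroup (xs.drop k))).length : Int)
      rw [ih]
      have hfe : (fun y : Bool => decide (y = true)) = (fun y => y) := by funext y; cases y <;> simp
      have hkk : k = (List.takeWhile (fun y : Bool => y) xs).length := by
        show (List.takeWhile (fun y => decide (y = true)) xs).length = _
        rw [hfe]
      by_cases h : 1 ≤ k
      · have hd : (true && decide ((k:Int)+1 ≥ 2)) = true := by simp; omega
        have h2 : 1 ≤ (List.takeWhile (fun y : Bool => y) xs).length := hkk ▸ h
        simp [hd, h2]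
        omega
      · have hd : (true && decide ((k:Int)+1 ≥ 2)) = false := by simp; omega
        have h2 : ¬ 1 ≤ (List.takeWhile (fun y : Bool => y) xs).length := hkk ▸ h
        simp [hd, h2]

theorem foldM_eq_countCont : ∀ (bs : List Bool) (big : Int) (n : Nat),
    (bs.foldl mStep (big, (n : Int), decide (2 ≤ (n : Int)))).1 = big + countCont n bs := by
  intro bs
  induction bs with
  | nil => intro big n; simp [countCont]
  | cons b bs ih =>
    intro big n
    cases b
    · have h : mStep (big, (n : Int), decide (2 ≤ (n : Int))) false = (big, ((0:Nat) : Int), decide (2 ≤ ((0:Nat) : Int))) := by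
        simp [mStep]
      rw [List.foldl_cons, h, ih]
      simp [countCont]
    · have h : mStep (big, (n : Int), decide (2 ≤ (n : Int))) true
        = ((if n = 1 then big + 1 else big), ((n+1 : Nat) : Int), decide (2 ≤ ((n+1:Nat) : Int))) := by
        rcases Nat.lt_or_ge n 1 with h0 | h1
        · interval_cases n
          simp [mStep]
        · rcases Nat.lt_or_ge n 2 with h0 | h2
          · interval_cases n
            simp [mStep]
          · have hne : ¬ n = 1 := by omega
            have hc : ¬ (2 ≤ (n:Int) + 1 ∧ n ≤ 1) := by omega
            simp [mStep, hne, hc]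
            constructor <;> omega
      rw [List.foldl_cons, h, ih]
      simp [countCont]
      split_ifs <;> ring

-- A's second-loop body is mStep applied to the flag of the group
theorem portFn2_eq : (fun (s : Int × Int × Bool) (g : List Char) =>
      let s1 := if (g.length : Int) ≥ 2 then (s.1, s.2.1 + 1, s.2.2) else (s.1, (0 : Int), false)
      if s1.2.1 ≥ 2 ∧ s1.2.2 = false then (s1.1 + 1, s1.2.1, true) else s1)
    = fun s g => mStep s (decide ((g.length : Int) ≥ 2)) := by
  funext s g
  by_cases h : (g.length : Int) ≥ 2 <;> simp [mStep, h]

-- ===== VERDICT (by name: the statement is the Claim_ definition above) =====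
theorem repeat_adjacent_spec : Claim_equal_repeat_adjacent := by
  intro st _
  unfold Spec_repeat_adjacent repeat_adjacent repeat_adjacent_alt
  cases hcs : st.toList with
  | nil =>
    simp [hcs, pvGroup, PySem.List.enumerate_nil]
  | cons c cs' =>
    simp only [hcs]
    -- phase 1: A's fold equals the abstract grouping machine
    have h1 := foldA_eq_stepG st (c :: cs') [] [] [] (by simpa using hcs) (by simp) (by simp)
    rw [hcs] at h1
    simp only [List.length_nil, Nat.cast_zero] at h1
    rw [h1]
    rw [List.foldl_cons, show stepG ([], []) c = ([], [] ++ [c]) from by simp [stepG]]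
    -- groups = groupsRec [c] cs'
    have h2 := stepG_groups cs' [] ([] ++ [c]) (by simp)
    -- phase 2: fold as mStep over flags
    rw [portFn2_eq]
    have hmf : ∀ (l : List (List Char)) (b : Int × Int × Bool),
        l.foldl (fun s g => mStep s (decide ((g.length : Int) ≥ 2))) b
        = (l.map (fun g => decide ((g.length : Int) ≥ 2))).foldl mStep b := by
      intro l b; rw [List.foldl_map]
    rw [hmf]
    rw [show ((cs'.foldl stepG ([], [] ++ [c])).1 ++ [(cs'.foldl stepG ([], [] ++ [c])).2]) = groupsRec ([] ++ [c]) cs' from by simpa using h2]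
    -- flags of A's groups = flags of B's pvGroup
    have hflags : (groupsRec ([] ++ [c]) cs').map (fun g => decide ((g.length : Int) ≥ 2))
        = (pvGroup (c :: cs')).map (fun p => decide (p.2 ≥ 2)) := by
      have hgl := groupsRec_lengths cs' [c] c (by simp) (by simp)
      have hm : (groupsRec [c] cs').map (fun g => decide ((g.length : Int) ≥ 2))
          = ((groupsRec [c] cs').map (fun g => (g.length : Int))).map (fun l => decide (l ≥ 2)) := by
        rw [List.map_map]; rfl
      rw [show ([] ++ [c] : List Char) = [c] from rfl, hm, hgl]
      rw [pvGroup]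
      simp [List.map_map, dropWhile_eq_drop_len]
      constructor <;> omega
    rw [hflags]
    have init : ((0 : Int), (0 : Int), false) = ((0 : Int), ((0:Nat) : Int), decide (2 ≤ ((0:Nat) : Int))) := by simp
    rw [init, foldM_eq_countCont, countCont_eq_countB]
    simp
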